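-- pv_equiv track=rewrite | github.com/ministr-kaifa/web-labs | labs/Lab_12_python_intro/solution/task2/task2.py | subarrays_medians_sum
-- ===== SOURCE A (Python) =====
-- from heapq import heappop, heappush
--
-- def subarrays_medians_sum(numbers: list):
--     """Функция расчета сумм медиан всех подмассивов [0:1], [0:2], [0:3], ... [0:n]"""
--     medians_sum = 0
--     smallerHalf, largerHalf = [], []
--     for number in numbers:
--         heappush(smallerHalf, -number)
--         heappush(largerHalf, -heappop(smallerHalf))
--         if len(smallerHalf) < len(largerHalf):
--             heappush(smallerHalf, -heappop(largerHalf))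
--         medians_sum += -smallerHalf[0]
--     return medians_sum
-- ===== SOURCE B (Python) =====
-- def subarrays_medians_sum(numbers: list):
--     """Sum of medians (lower median for even length) of all prefixes of numbers."""
--     total = 0
--     pref = []  # kept sorted ascending
--     for number in numbers:
--         lo, hi = 0, len(pref)
--         while lo < hi:  # binary search for the insertion point (rightmost)
--             mid = (lo + hi) // 2
--             if pref[mid] <= number:
--                 lo = mid + 1
--             else:
--                 hi = mid
--         pref.insert(lo, number)
--         total += pref[(len(pref) - 1) // 2]
--     return total
-- ===== Notes on version B (the rewrite author's own statement) =====
-- stated objective: simpler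
-- what changed: Replaces the two-heap balancing scheme with a single list kept in sorted order: each number is binary-search inserted in place and the lower median is read directly at index (k-1)//2.
import Mathlib
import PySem

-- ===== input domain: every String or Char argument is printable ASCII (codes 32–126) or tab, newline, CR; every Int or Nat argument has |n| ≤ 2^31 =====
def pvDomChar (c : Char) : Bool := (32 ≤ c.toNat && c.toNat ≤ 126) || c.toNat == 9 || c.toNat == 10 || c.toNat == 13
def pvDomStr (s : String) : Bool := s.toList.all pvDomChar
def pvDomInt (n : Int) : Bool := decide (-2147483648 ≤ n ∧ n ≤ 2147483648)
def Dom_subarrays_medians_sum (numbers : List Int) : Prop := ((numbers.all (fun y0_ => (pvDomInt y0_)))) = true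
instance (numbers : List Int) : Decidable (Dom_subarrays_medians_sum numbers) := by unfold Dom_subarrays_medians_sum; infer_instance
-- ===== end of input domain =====

-- B replaces A's two balanced heaps by one list kept sorted, reading the lower median at index (k-1)//2: simpler state, direct retrieval.

-- ===== PORT A =====
-- heapq heaps are modeled as multisets (plain lists): heappush appends, heappop removes one
-- minimal occurrence, and h[0] reads the minimum — exact on every value A observes, since the
-- only heap observables A uses (popped element, root) are the heap's minimum.
def pvHeapMin (h : List Int) : Int :=
  match h with
  | [] => 0
  | x :: xs => xs.foldl min x

def pvRemoveFirst (h : List Int) (m : Int) : List Int :=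
  match h with
  | [] => []
  | x :: xs => if x = m then xs else x :: pvRemoveFirst xs m

def pvHeapPush (h : List Int) (x : Int) : List Int := h ++ [x]

def pvHeapPop (h : List Int) : Int × List Int :=
  (pvHeapMin h, pvRemoveFirst h (pvHeapMin h))

def subarrays_medians_sum_go (rest : List Int) (msum : Int) (S L : List Int) : Int :=
  match rest with
  | [] => msum
  | number :: rest' =>
    let S1 := pvHeapPush S (-number)
    let p1 := pvHeapPop S1
    let L1 := pvHeapPush L (-p1.1)
    let SL :=
      if p1.2.length < L1.length then
        let p2 := pvHeapPop L1
        (pvHeapPush p1.2 (-p2.1), p2.2)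
      else (p1.2, L1)
    subarrays_medians_sum_go rest' (msum + -(pvHeapMin SL.1)) SL.1 SL.2

def subarrays_medians_sum (numbers : List Int) : Int :=
  subarrays_medians_sum_go numbers 0 [] []

-- ===== PORT B =====
-- Source B's binary search for the insertion point (the while lo < hi loop)
def pvBisect (pref : List Int) (x : Int) (lo hi : Nat) : Nat :=
  if _h : lo < hi then
    -- pref[mid] is read with getD: mid < hi ≤ len(pref), so this is exactly Python's pref[mid]
    if pref.getD ((lo + hi) / 2) 0 ≤ x then pvBisect pref x ((lo + hi) / 2 + 1) hi
    else pvBisect pref x lo ((lo + hi) / 2)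
  else lo
termination_by hi - lo
decreasing_by all_goals omega

def subarrays_medians_sum_alt_go (rest : List Int) (total : Int) (pref : List Int) : Int :=
  match rest with
  | [] => total
  | number :: rest' =>
    let lo := pvBisect pref number 0 pref.length
    let p := pref.insertIdx lo number
    -- p[(len(p)-1)//2]: the index is a Nat in [0, len), so getD is exact here
    subarrays_medians_sum_alt_go rest' (total + p.getD ((p.length - 1) / 2) 0) p

def subarrays_medians_sum_alt (numbers : List Int) : Int :=
  subarrays_medians_sum_alt_go numbers 0 []

-- ===== PRECONDITION & SPEC =====
def Spec_subarrays_medians_sum (numbers : List Int) (out : Int) : Prop := out = subarrays_medians_sum_alt numbers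
instance (numbers : List Int) (out : Int) : Decidable (Spec_subarrays_medians_sum numbers out) := by unfold Spec_subarrays_medians_sum; infer_instance

-- ===== CLAIM (what is proved, stated in full; the proofs are below) =====
def Claim_equal_subarrays_medians_sum : Prop := ∀ (numbers : List Int), Dom_subarrays_medians_sum numbers → Spec_subarrays_medians_sum numbers (subarrays_medians_sum numbers)

-- ===== LEMMAS AND PROOFS =====

-- the loop invariant tying A's two heaps to B's sorted prefix
def pvInv (S L pref : List Int) : Prop :=
  pref.Pairwise (· ≤ ·) ∧
  ((S.map (fun a => -a)) ++ L).Perm pref ∧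
  S.length = (pref.length + 1) / 2 ∧
  (∀ a ∈ S, ∀ b ∈ L, -a ≤ b)

theorem pvBisect_bounds (pref : List Int) (x : Int) (lo hi : Nat) (h : lo ≤ hi) :
    lo ≤ pvBisect pref x lo hi ∧ pvBisect pref x lo hi ≤ hi := by
  induction lo, hi using pvBisect.induct pref x with
  | case1 lo hi hlt hle ih =>
    rw [pvBisect, dif_pos hlt, if_pos hle]
    have := ih (by omega)
    omega
  | case2 lo hi hlt hgt ih =>
    rw [pvBisect, dif_pos hlt, if_neg hgt]
    have := ih (by omega)
    omega
  | case3 lo hi hge =>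
    rw [pvBisect, dif_neg hge]
    omega

theorem pvBisect_spec (pref : List Int) (x : Int) (hs : pref.Pairwise (· ≤ ·))
    (lo hi : Nat) (hlohi : lo ≤ hi) (hhi : hi ≤ pref.length)
    (hleft : ∀ j, j < lo → ∀ (hj : j < pref.length), pref[j] ≤ x)
    (hright : ∀ j, hi ≤ j → ∀ (hj : j < pref.length), x < pref[j]) :
    (∀ j, j < pvBisect pref x lo hi → ∀ (hj : j < pref.length), pref[j] ≤ x) ∧
    (∀ j, pvBisect pref x lo hi ≤ j → ∀ (hj : j < pref.length), x < pref[j]) := by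
  induction lo, hi using pvBisect.induct pref x with
  | case1 lo hi hlt hle ih =>
    rw [pvBisect, dif_pos hlt, if_pos hle]
    have hmidlt : (lo + hi) / 2 < pref.length := by omega
    have hmidle : pref[(lo + hi) / 2] ≤ x := by
      rw [List.getD_eq_getElem pref 0 hmidlt] at hle
      exact hle
    refine ih (by omega) hhi ?_ hright
    intro j hj hjl
    rcases Nat.lt_or_ge j lo with h | h
    · exact hleft j h hjl
    · rcases Nat.eq_or_lt_of_le (by omega : j ≤ (lo + hi) / 2) with h2 | h2
      · exact h2 ▸ hmidle
      · exact le_trans (List.pairwise_iff_getElem.mp hs j _ hjl hmidlt h2) hmidle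
  | case2 lo hi hlt hgt ih =>
    rw [pvBisect, dif_pos hlt, if_neg hgt]
    have hmidlt : (lo + hi) / 2 < pref.length := by omega
    have hmidgt : x < pref[(lo + hi) / 2] := by
      rw [List.getD_eq_getElem pref 0 hmidlt] at hgt
      omega
    refine ih (by omega) (by omega) hleft ?_
    intro j hj hjl
    rcases Nat.eq_or_lt_of_le hj with h2 | h2
    · exact h2 ▸ hmidgt
    · exact lt_of_lt_of_le hmidgt (List.pairwise_iff_getElem.mp hs _ j hmidlt hjl h2)
  | case3 lo hi hge =>
    rw [pvBisect, dif_neg hge]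
    have : lo = hi := by omega
    subst this
    exact ⟨hleft, fun j hj hjl => hright j hj hjl⟩

theorem pvInsertIdx_eq (l : List Int) (i : Nat) (x : Int) (h : i ≤ l.length) :
    l.insertIdx i x = l.take i ++ x :: l.drop i := by
  induction l generalizing i with
  | nil =>
    simp at h
    subst h
    rfl
  | cons y ys ihy =>
    cases i with
    | zero => rfl
    | succ n =>
      simp only [List.insertIdx_succ_cons, List.take_succ_cons, List.drop_succ_cons,
        List.cons_append, List.cons.injEq, true_and]
      exact ihy n (by simpa using h)

theorem pvBInsert_perm (x : Int) (pref : List Int) : (pref.insertIdx (pvBisect pref x 0 pref.length) x).Perm (x :: pref) := by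
  exact List.perm_insertIdx x pref (pvBisect_bounds pref x 0 pref.length (Nat.zero_le _)).2

theorem pvBInsert_pairwise (x : Int) (pref : List Int) (hs : pref.Pairwise (· ≤ ·)) :
    (pref.insertIdx (pvBisect pref x 0 pref.length) x).Pairwise (· ≤ ·) := by
  obtain ⟨hL, hR⟩ := pvBisect_spec pref x hs 0 pref.length (Nat.zero_le _) le_rfl
    (by omega) (by omega)
  set i := pvBisect pref x 0 pref.length with hi
  have hile : i ≤ pref.length := (pvBisect_bounds pref x 0 pref.length (Nat.zero_le _)).2
  rw [pvInsertIdx_eq pref i x hile]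
  rw [List.pairwise_append]
  refine ⟨hs.sublist (List.take_sublist i pref), ?_, ?_⟩
  · rw [List.pairwise_cons]
    refine ⟨?_, hs.sublist (List.drop_sublist i pref)⟩
    intro b hb
    obtain ⟨k, hk, rfl⟩ := List.mem_iff_getElem.mp hb
    rw [List.getElem_drop]
    exact le_of_lt (hR (i + k) (by omega) (by simp at hk; omega))
  · intro a ha b hb
    obtain ⟨j, hj, rfl⟩ := List.mem_iff_getElem.mp ha
    have hjlen : j < pref.length := by
      simp at hj
      omega
    have hax : (pref.take i)[j] ≤ x := by
      rw [List.getElem_take]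
      exact hL j (by simp at hj; omega) hjlen
    rcases List.mem_cons.mp hb with rfl | hbd
    · exact hax
    · obtain ⟨k, hk, rfl⟩ := List.mem_iff_getElem.mp hbd
      rw [List.getElem_drop]
      exact le_trans hax (le_of_lt (hR (i + k) (by omega) (by simp at hk; omega)))




theorem foldl_min_mem (x : Int) (xs : List Int) : xs.foldl min x = x ∨ xs.foldl min x ∈ xs := by
  induction xs generalizing x with
  | nil => simp
  | cons y ys ih =>
    simp only [List.foldl_cons]
    rcases ih (min x y) with h | h
    · rcases le_total x y with h2 | h2
      · left; rw [h]; exact min_eq_left h2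
      · right; simp only [List.mem_cons]; left; rw [h]; exact (min_eq_right h2).symm ▸ rfl
    · right; exact List.mem_cons_of_mem _ h

theorem foldl_min_le (x : Int) (xs : List Int) : xs.foldl min x ≤ x ∧ ∀ y ∈ xs, xs.foldl min x ≤ y := by
  induction xs generalizing x with
  | nil => simp
  | cons z zs ih =>
    obtain ⟨h1, h2⟩ := ih (min x z)
    refine ⟨le_trans h1 (min_le_left _ _), ?_⟩
    intro y hy
    rcases List.mem_cons.mp hy with rfl | hy
    · exact le_trans h1 (min_le_right _ _)
    · exact h2 y hy

theorem pvHeapMin_mem (h : List Int) (hne : h ≠ []) : pvHeapMin h ∈ h := by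
  cases h with
  | nil => exact absurd rfl hne
  | cons x xs =>
    rcases foldl_min_mem x xs with h | h
    · simp [pvHeapMin, h]
    · exact List.mem_cons_of_mem _ h

theorem pvHeapMin_le (h : List Int) : ∀ y ∈ h, pvHeapMin h ≤ y := by
  cases h with
  | nil => simp
  | cons x xs =>
    intro y hy
    obtain ⟨h1, h2⟩ := foldl_min_le x xs
    rcases List.mem_cons.mp hy with rfl | hy
    · exact h1
    · exact h2 y hy

theorem pvRemoveFirst_perm (h : List Int) (m : Int) (hm : m ∈ h) :
    h.Perm (m :: pvRemoveFirst h m) := by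
  induction h with
  | nil => simp at hm
  | cons x xs ih =>
    by_cases hx : x = m
    · subst hx; simp [pvRemoveFirst]
    · rcases List.mem_cons.mp hm with rfl | hm'
      · exact absurd rfl hx
      · simp only [pvRemoveFirst, if_neg hx]
        exact (List.Perm.cons x (ih hm')).trans (List.Perm.swap m x _)

theorem pvRemoveFirst_subset (h : List Int) (m : Int) :
    ∀ y ∈ pvRemoveFirst h m, y ∈ h := by
  induction h with
  | nil => simp [pvRemoveFirst]
  | cons x xs ih =>
    intro y hy
    simp only [pvRemoveFirst] at hy
    split at hy
    · exact List.mem_cons_of_mem _ hy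
    · rcases List.mem_cons.mp hy with rfl | hy'
      · exact List.mem_cons_self
      · exact List.mem_cons_of_mem _ (ih y hy')





theorem pvMedian (S L pref : List Int) (hinv : pvInv S L pref) (hne : pref ≠ []) :
    -(pvHeapMin S) = pref.getD ((pref.length - 1) / 2) 0 := by
  obtain ⟨hsort, hperm, hlen, hord⟩ := hinv
  set low := S.map (fun a => -a) with hlow
  set sl := PySem.List.sorted low (fun x => x) false with hsl
  set sh := PySem.List.sorted L (fun x => x) false with hsh
  have hsl_perm : sl.Perm low := PySem.List.sorted_perm low (fun x => x) false
  have hsh_perm : sh.Perm L := PySem.List.sorted_perm L (fun x => x) false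
  have hsl_pw : sl.Pairwise (· ≤ ·) := PySem.List.sorted_pairwise low (fun x => x)
  have hsh_pw : sh.Pairwise (· ≤ ·) := PySem.List.sorted_pairwise L (fun x => x)
  have hcross : ∀ a ∈ low, ∀ b ∈ L, a ≤ b := by
    intro a ha b hb
    rw [hlow, List.mem_map] at ha
    obtain ⟨a', ha', rfl⟩ := ha
    exact hord a' ha' b hb
  have hpw : (sl ++ sh).Pairwise (· ≤ ·) := by
    rw [List.pairwise_append]
    exact ⟨hsl_pw, hsh_pw, fun a ha b hb =>
      hcross a (hsl_perm.mem_iff.mp ha) b (hsh_perm.mem_iff.mp hb)⟩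
  have hperm2 : (sl ++ sh).Perm pref := (hsl_perm.append hsh_perm).trans hperm
  have heq : pref = sl ++ sh := (hperm2.eq_of_pairwise (fun a b _ _ h1 h2 => le_antisymm h1 h2) hpw hsort).symm
  -- sizes
  have hn : 1 ≤ pref.length := by
    cases pref with
    | nil => exact absurd rfl hne
    | cons _ _ => simp
  have hs : S.length = (pref.length + 1) / 2 := hlen
  have hslen : sl.length = S.length := by
    rw [hsl_perm.length_eq, hlow, List.length_map]
  have hidx : (pref.length - 1) / 2 = S.length - 1 := by omega
  have hs1 : 1 ≤ S.length := by omega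
  have hSne : S ≠ [] := by
    cases S with
    | nil => simp at hs1
    | cons _ _ => simp
  -- the element read
  have hlt : S.length - 1 < sl.length := by omega
  have hgetD : pref.getD ((pref.length - 1) / 2) 0 = sl[S.length - 1] := by
    rw [hidx, heq, List.getD_eq_getElem?_getD, List.getElem?_append_left hlt,
      List.getElem?_eq_getElem hlt]
    rfl
  -- sl[s-1] is a maximum of low
  have he_mem : sl[S.length - 1] ∈ low := hsl_perm.mem_iff.mp (List.getElem_mem hlt)
  have he_max : ∀ y ∈ low, y ≤ sl[S.length - 1] := by
    intro y hy
    obtain ⟨i, hi, rfl⟩ := List.mem_iff_getElem.mp (hsl_perm.mem_iff.mpr hy)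
    rcases Nat.lt_or_ge i (S.length - 1) with h | h
    · exact List.pairwise_iff_getElem.mp hsl_pw i (S.length - 1) hi hlt h
    · have hieq : i = S.length - 1 := by omega
      subst hieq; exact le_refl _
  have hM_mem : -(pvHeapMin S) ∈ low := List.mem_map.mpr ⟨_, pvHeapMin_mem S hSne, rfl⟩
  have hM_max : ∀ y ∈ low, y ≤ -(pvHeapMin S) := by
    intro y hy
    rw [hlow, List.mem_map] at hy
    obtain ⟨a, ha, rfl⟩ := hy
    have := pvHeapMin_le S a ha
    omega
  rw [hgetD]
  exact le_antisymm (he_max _ hM_mem) (hM_max _ he_mem)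


theorem pvStep (S L pref : List Int) (x : Int) (hinv : pvInv S L pref) :
    pvInv (if (pvRemoveFirst (pvHeapPush S (-x)) (pvHeapMin (pvHeapPush S (-x)))).length <
              (pvHeapPush L (-(pvHeapMin (pvHeapPush S (-x))))).length then
             pvHeapPush (pvRemoveFirst (pvHeapPush S (-x)) (pvHeapMin (pvHeapPush S (-x))))
               (-(pvHeapMin (pvHeapPush L (-(pvHeapMin (pvHeapPush S (-x)))))))
           else pvRemoveFirst (pvHeapPush S (-x)) (pvHeapMin (pvHeapPush S (-x))))
          (if (pvRemoveFirst (pvHeapPush S (-x)) (pvHeapMin (pvHeapPush S (-x)))).length <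
              (pvHeapPush L (-(pvHeapMin (pvHeapPush S (-x))))).length then
             pvRemoveFirst (pvHeapPush L (-(pvHeapMin (pvHeapPush S (-x)))))
               (pvHeapMin (pvHeapPush L (-(pvHeapMin (pvHeapPush S (-x))))))
           else pvHeapPush L (-(pvHeapMin (pvHeapPush S (-x)))))
          (pref.insertIdx (pvBisect pref x 0 pref.length) x) := by
  obtain ⟨hsort, hperm, hlen, hord⟩ := hinv
  set S1 := pvHeapPush S (-x) with hS1def
  set m := pvHeapMin S1 with hmdef
  set S2 := pvRemoveFirst S1 m with hS2def
  set L1 := pvHeapPush L (-m) with hL1def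
  have hS1ne : S1 ≠ [] := by simp [hS1def, pvHeapPush]
  have hm_mem : m ∈ S1 := pvHeapMin_mem S1 hS1ne
  have hm_le : ∀ y ∈ S1, m ≤ y := pvHeapMin_le S1
  have hS1S2 : S1.Perm (m :: S2) := pvRemoveFirst_perm S1 m hm_mem
  have hS2len : S2.length = S.length := by
    have := hS1S2.length_eq
    simp [hS1def, pvHeapPush] at this
    omega
  have hL1len : L1.length = L.length + 1 := by simp [hL1def, pvHeapPush]
  have hSL : S.length + L.length = pref.length := by
    have := hperm.length_eq
    simpa using this
  have hpref' : (pref.insertIdx (pvBisect pref x 0 pref.length) x).length = pref.length + 1 :=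
    (pvBInsert_perm x pref).length_eq.trans (by simp)
  -- values of S1 as a multiset
  have hS1neg : (S1.map (fun a => -a)).Perm (x :: (S.map (fun a => -a))) := by
    rw [hS1def]
    simp only [pvHeapPush, List.map_append, List.map_cons, List.map_nil, neg_neg]
    exact List.perm_append_comm (l₁ := S.map (fun a => -a)) (l₂ := [x])
  have hmS2neg : (S1.map (fun a => -a)).Perm ((-m) :: (S2.map (fun a => -a))) := by
    simpa using hS1S2.map (fun a => -a)
  -- shared ordering fact: every remaining element of S2 (negated) is below every element of L
  have ordS2 : ∀ a ∈ S2, ∀ b ∈ L, -a ≤ b := by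
    intro a ha b hb
    by_cases haS : a ∈ S
    · exact hord a haS b hb
    · -- a ∉ S: then a = -x and m ∈ S, so -a = x ≤ -m ≤ b? use m ∈ S
      have haS1 : a ∈ S1 := pvRemoveFirst_subset S1 m a ha
      have hax : a = -x := by
        rcases (by simpa [hS1def, pvHeapPush] using haS1 : a ∈ S ∨ a = -x) with h | h
        · exact absurd h haS
        · exact h
      have hma : m ≠ a := by
        intro hma
        have hc := hS1S2.count_eq a
        rw [List.count_cons] at hc
        have h1 : S1.count a = S.count a + 1 := by
          simp [hS1def, pvHeapPush, hax]
        have h2 : S.count a = 0 := List.count_eq_zero.mpr haS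
        have h3 : 1 ≤ S2.count a := List.one_le_count_iff.mpr ha
        simp [hma] at hc
        omega
      have hmS : m ∈ S := by
        rcases (by simpa [hS1def, pvHeapPush] using hm_mem : m ∈ S ∨ m = -x) with h | h
        · exact h
        · exact absurd (h.trans hax.symm) hma
      have h1 : -m ≤ b := hord m hmS b hb
      have h2 : m ≤ a := hm_le a haS1
      omega
  have hpw' : (pref.insertIdx (pvBisect pref x 0 pref.length) x).Pairwise (· ≤ ·) := pvBInsert_pairwise x pref hsort
  by_cases hc : S2.length < L1.length
  · -- rebalance: m2 comes back from L1
    rw [if_pos hc, if_pos hc]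
    set m2 := pvHeapMin L1 with hm2def
    set L2 := pvRemoveFirst L1 m2 with hL2def
    have hL1ne : L1 ≠ [] := by simp [hL1def, pvHeapPush]
    have hm2_mem : m2 ∈ L1 := pvHeapMin_mem L1 hL1ne
    have hm2_le : ∀ y ∈ L1, m2 ≤ y := pvHeapMin_le L1
    have hL1L2 : L1.Perm (m2 :: L2) := pvRemoveFirst_perm L1 m2 hm2_mem
    have hL2len : L2.length = L.length := by
      have := hL1L2.length_eq
      simp at this
      omega
    refine ⟨hpw', ?_, ?_, ?_⟩
    · -- permutation
      refine List.Perm.trans ?_ (pvBInsert_perm x pref).symm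
      have e1 : (pvHeapPush S2 (-m2)).map (fun a => -a) ++ L2 =
          S2.map (fun a => -a) ++ (m2 :: L2) := by
        simp [pvHeapPush]
      rw [e1]
      refine ((hL1L2.symm).append_left _).trans ?_
      have e2 : S2.map (fun a => -a) ++ L1 = S2.map (fun a => -a) ++ (L ++ [-m]) := by
        rw [hL1def]; rfl
      rw [e2]
      refine ((List.perm_append_singleton (-m) L).append_left _).trans ?_
      refine (List.perm_middle).trans ?_
      show ((-m) :: S2.map (fun a => -a) ++ L).Perm _
      refine ((hmS2neg.symm).append_right L).trans ?_
      refine ((hS1neg).append_right L).trans ?_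
      exact hperm.cons x
    · -- length
      simp only [pvHeapPush, List.length_append, List.length_singleton, hpref']
      omega
    · -- ordering
      intro a ha b hb
      have hbL1 : b ∈ L1 := pvRemoveFirst_subset L1 m2 b hb
      rcases (by simpa [pvHeapPush] using ha : a ∈ S2 ∨ a = -m2) with haS2 | ham2
      · rcases (by simpa [hL1def, pvHeapPush] using hbL1 : b ∈ L ∨ b = -m) with hbL | hbm
        · exact ordS2 a haS2 b hbL
        · have : m ≤ a := hm_le a (pvRemoveFirst_subset S1 m a haS2)
          omega
      · have := hm2_le b hbL1
        omega
  · rw [if_neg hc, if_neg hc]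
    refine ⟨hpw', ?_, ?_, ?_⟩
    · refine List.Perm.trans ?_ (pvBInsert_perm x pref).symm
      have e2 : S2.map (fun a => -a) ++ L1 = S2.map (fun a => -a) ++ (L ++ [-m]) := by
        rw [hL1def]; rfl
      rw [e2]
      refine ((List.perm_append_singleton (-m) L).append_left _).trans ?_
      refine (List.perm_middle).trans ?_
      show ((-m) :: S2.map (fun a => -a) ++ L).Perm _
      refine ((hmS2neg.symm).append_right L).trans ?_
      refine ((hS1neg).append_right L).trans ?_
      exact hperm.cons x
    · simp only [hS2len, hpref']
      simp only [hL1len, hS2len] at hc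
      omega
    · intro a ha b hb
      rcases (by simpa [hL1def, pvHeapPush] using hb : b ∈ L ∨ b = -m) with hbL | hbm
      · exact ordS2 a ha b hbL
      · have : m ≤ a := hm_le a (pvRemoveFirst_subset S1 m a ha)
        omega


theorem pvGo (rest : List Int) (msum : Int) (S L pref : List Int) (hinv : pvInv S L pref) :
    subarrays_medians_sum_go rest msum S L = subarrays_medians_sum_alt_go rest msum pref := by
  induction rest generalizing msum S L pref with
  | nil => rfl
  | cons x rest' ih =>
    simp only [subarrays_medians_sum_go, subarrays_medians_sum_alt_go, pvHeapPop,
      apply_ite Prod.fst, apply_ite Prod.snd]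
    have hstep := pvStep S L pref x hinv
    have hne : pref.insertIdx (pvBisect pref x 0 pref.length) x ≠ [] := by
      have := (pvBInsert_perm x pref).length_eq
      intro h
      rw [h] at this
      simp at this
    have hmed := pvMedian _ _ _ hstep hne
    rw [ih _ _ _ _ hstep, hmed]

-- ===== VERDICT (by name: the statement is the Claim_ definition above) =====
theorem subarrays_medians_sum_spec : Claim_equal_subarrays_medians_sum := by
  intro numbers _
  unfold Spec_subarrays_medians_sum subarrays_medians_sum subarrays_medians_sum_alt
  exact pvGo numbers 0 [] [] [] (by refine ⟨?_, ?_, ?_, ?_⟩ <;> simp)
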